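-- pv_equiv track=rewrite | github.com/Cbhushan502/learningpython | DSA/Semondrilap_prblm_2.py | find_longest_semordnilap
-- ===== SOURCE A (Python) =====
-- def is_semordnilap(word1, word2):
--     return word1[::-1] == word2
--
-- def find_longest_semordnilap(words):
--     longest_semordnilap = ""
--     for i, word1 in enumerate(words):
--         for j, word2 in enumerate(words):
--             if i !=j and is_semordnilap(word1, word2):
--                 if len(word1) > len(longest_semordnilap):
--                     longest_semordnilap = word1
--     return longest_semordnilap
-- ===== SOURCE B (Python) =====
-- def find_longest_semordnilap(words):
--     counts = {}
--     for w in words: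
--         counts[w] = counts.get(w, 0) + 1
--     best = ""
--     for w in words:
--         if len(w) > len(best):
--             r = w[::-1]
--             if counts.get(r, 0) >= (2 if r == w else 1):
--                 best = w
--     return best
-- ===== Notes on version B (the rewrite author's own statement) =====
-- stated objective: faster
-- what changed: Replaces the quadratic all-pairs scan by a count dictionary built in one pass, so each word's reversal is checked by a multiplicity lookup (>=2 for palindromes, >=1 otherwise) in a single pass over the words.
import Mathlib
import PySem

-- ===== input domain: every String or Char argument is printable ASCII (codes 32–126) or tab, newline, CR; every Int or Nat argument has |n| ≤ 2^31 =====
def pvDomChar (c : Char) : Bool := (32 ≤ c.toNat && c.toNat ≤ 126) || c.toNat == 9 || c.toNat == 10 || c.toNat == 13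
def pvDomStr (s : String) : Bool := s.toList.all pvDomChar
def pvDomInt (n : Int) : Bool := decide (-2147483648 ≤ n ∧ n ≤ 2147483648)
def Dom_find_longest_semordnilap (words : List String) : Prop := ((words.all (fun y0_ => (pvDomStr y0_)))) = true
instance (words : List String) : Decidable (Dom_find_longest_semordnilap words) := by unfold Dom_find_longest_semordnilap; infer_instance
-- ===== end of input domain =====

-- B replaces A's quadratic all-pairs scan by a count dictionary built once, then a single pass
-- checking the multiplicity of each word's reversal (objective: faster).

-- ===== PORT A =====
def is_semordnilap (word1 word2 : String) : Bool :=
  -- word1[::-1] == word2 ; a slice with step -1 never raises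
  match PySem.Str.slice? word1 none none (-1) with
  | some r => r == word2
  | none => false

def find_longest_semordnilap (words : List String) : String :=
  (PySem.List.enumerate words 0).foldl
    (fun longest iw =>
      (PySem.List.enumerate words 0).foldl
        (fun longest jw =>
          if iw.1 != jw.1 && is_semordnilap iw.2 jw.2 then
            if PySem.Str.len iw.2 > PySem.Str.len longest then iw.2 else longest
          else longest)
        longest)
    ""

-- ===== PORT B =====
def find_longest_semordnilap_alt (words : List String) : String :=
  let counts : PySem.Dict String Int :=
    words.foldl (fun d w => d.insert w (d.getD w 0 + 1)) PySem.Dict.empty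
  words.foldl
    (fun best w =>
      if PySem.Str.len w > PySem.Str.len best then
        match PySem.Str.slice? w none none (-1) with
        | some r => if counts.getD r 0 ≥ (if r == w then 2 else 1) then w else best
        | none => best
      else best)
    ""

-- ===== PRECONDITION & SPEC =====
def Spec_find_longest_semordnilap (words : List String) (out : String) : Prop := out = find_longest_semordnilap_alt words
instance (words : List String) (out : String) : Decidable (Spec_find_longest_semordnilap words out) := by unfold Spec_find_longest_semordnilap; infer_instance

-- ===== CLAIM (what is proved, stated in full; the proofs are below) =====
def Claim_equal_find_longest_semordnilap : Prop := ∀ (words : List String), Dom_find_longest_semordnilap words → Spec_find_longest_semordnilap words (find_longest_semordnilap words)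

-- ===== LEMMAS AND PROOFS =====

-- the reversal of a word
def pvRev (w : String) : String := String.ofList w.toList.reverse

-- the common shape both folds reduce to: keep the first strictly longer word whose
-- reversal occurs often enough in the whole list
def pvCanon (words : List String) : String :=
  words.foldl
    (fun best w =>
      if PySem.Str.len w > PySem.Str.len best ∧
          ((words.count (pvRev w) : Int) ≥ if pvRev w == w then 2 else 1) then w else best)
    ""

theorem is_semordnilap_eq (w1 w2 : String) :
    is_semordnilap w1 w2 = (pvRev w1 == w2) := by
  simp [is_semordnilap, PySem.Str.slice?_none_none_neg_one, pvRev]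

-- A's inner loop either installs word1 (when some other index holds its reversal and it is
-- strictly longer than the current best) or leaves the accumulator unchanged
theorem innerA_eq (i : Int) (w1 : String) (l : List (Int × String)) (best : String) :
    l.foldl
      (fun b jw =>
        if i != jw.1 && is_semordnilap w1 jw.2 then
          if PySem.Str.len w1 > PySem.Str.len b then w1 else b
        else b) best
    = if (l.any fun jw => i != jw.1 && is_semordnilap w1 jw.2) ∧
          PySem.Str.len w1 > PySem.Str.len best then w1 else best := by
  induction l generalizing best with
  | nil => simp
  | cons p t ih =>
    simp only [List.foldl_cons, List.any_cons]
    by_cases hp : (i != p.1 && is_semordnilap w1 p.2) = true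
    · rw [if_pos hp]
      simp only [hp, Bool.true_or]
      by_cases hl : PySem.Str.len w1 > PySem.Str.len best
      · rw [if_pos hl, ih, if_neg (fun h => absurd h.2 (lt_irrefl _)), if_pos ⟨trivial, hl⟩]
      · rw [if_neg hl, ih, if_neg (fun h => hl h.2), if_neg (fun h => hl h.2)]
    · rw [if_neg hp]
      simp only [Bool.eq_false_iff.mpr hp, Bool.false_or]
      rw [ih]

-- counting r in l splits at position k
theorem count_split_at {α : Type} [DecidableEq α] (l : List α) (k : Nat) (hk : k < l.length)
    (r : α) :
    l.count r = (l.eraseIdx k).count r + if l[k] = r then 1 else 0 := by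
  conv_lhs => rw [← List.take_append_drop k l, List.drop_eq_getElem_cons hk]
  rw [List.eraseIdx_eq_take_drop_succ]
  simp only [List.count_append, List.count_cons]
  by_cases h : l[k] = r
  · simp [h]
    omega
  · simp [h]

-- the existence of a distinct index holding the reversal equals B's multiplicity test
theorem key_cond (words : List String) (k : Nat) (hk : k < words.length) :
    (((PySem.List.enumerate words 0).any
        fun jw => (0 + (k : Int)) != jw.1 && is_semordnilap words[k] jw.2) = true)
    ↔ ((words.count (pvRev words[k]) : Int) ≥ if pvRev words[k] == words[k] then 2 else 1) := by
  have hmem : pvRev words[k] ∈ words.eraseIdx k ↔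
      0 < (words.eraseIdx k).count (pvRev words[k]) := List.count_pos_iff.symm
  have hsplit := count_split_at words k hk (pvRev words[k])
  constructor
  · intro h
    rw [List.any_eq_true] at h
    obtain ⟨p, hp, hc⟩ := h
    rw [PySem.List.mem_enumerate_iff] at hp
    obtain ⟨m, hm, rfl⟩ := hp
    simp only [is_semordnilap_eq, Bool.and_eq_true, bne_iff_ne, ne_eq, beq_iff_eq] at hc
    obtain ⟨hne, hrev⟩ := hc
    have hmk : m ≠ k := fun h => hne (by rw [h])
    have hcnt : 0 < (words.eraseIdx k).count (pvRev words[k]) := by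
      apply hmem.mp
      rw [List.mem_eraseIdx_iff_getElem]
      exact ⟨m, hm, hmk, hrev.symm⟩
    rw [hsplit]
    by_cases hpal : pvRev words[k] = words[k]
    · rw [if_pos hpal.symm, if_pos (beq_iff_eq.mpr hpal)]
      push_cast; omega
    · rw [if_neg (fun h => hpal h.symm), if_neg (by simp [hpal])]
      push_cast; omega
  · intro h
    rw [hsplit] at h
    have hcnt : 0 < (words.eraseIdx k).count (pvRev words[k]) := by
      by_cases hpal : pvRev words[k] = words[k]
      · rw [if_pos hpal.symm, if_pos (beq_iff_eq.mpr hpal)] at h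
        push_cast at h; omega
      · rw [if_neg (fun he => hpal he.symm), if_neg (by simp [hpal])] at h
        push_cast at h; omega
    have hx : pvRev words[k] ∈ words.eraseIdx k := hmem.mpr hcnt
    rw [List.mem_eraseIdx_iff_getElem] at hx
    obtain ⟨m, hm, hmk, hv⟩ := hx
    rw [List.any_eq_true]
    refine ⟨(0 + (m : Int), words[m]), ?_, ?_⟩
    · rw [PySem.List.mem_enumerate_iff]
      exact ⟨m, hm, rfl⟩
    simp only [is_semordnilap_eq, Bool.and_eq_true, bne_iff_ne, ne_eq, beq_iff_eq]
    exact ⟨fun h => hmk (by omega), hv.symm⟩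

-- the same, phrased for a member of enumerate
theorem key_cond' (words : List String) (iw : Int × String)
    (h : iw ∈ PySem.List.enumerate words 0) :
    (((PySem.List.enumerate words 0).any
        fun jw => iw.1 != jw.1 && is_semordnilap iw.2 jw.2) = true)
    ↔ ((words.count (pvRev iw.2) : Int) ≥ if pvRev iw.2 == iw.2 then 2 else 1) := by
  rw [PySem.List.mem_enumerate_iff] at h
  obtain ⟨m, hm, rfl⟩ := h
  exact key_cond words m hm

-- folding over enumerate while using only the element equals folding over the list
theorem foldl_enumerate_snd {α β : Type} (xs : List α) (g : β → α → β) :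
    ∀ (s : Int) (init : β),
      (PySem.List.enumerate xs s).foldl (fun b p => g b p.2) init = xs.foldl g init := by
  induction xs with
  | nil => intro s init; simp [PySem.List.enumerate_nil]
  | cons x t ih =>
    intro s init
    rw [PySem.List.enumerate_cons, List.foldl_cons, List.foldl_cons, ih]

theorem A_eq_canon (words : List String) :
    find_longest_semordnilap words = pvCanon words := by
  unfold find_longest_semordnilap pvCanon
  have h1 :
      (PySem.List.enumerate words 0).foldl
        (fun longest iw =>
          (PySem.List.enumerate words 0).foldl
            (fun longest jw =>
              if iw.1 != jw.1 && is_semordnilap iw.2 jw.2 then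
                if PySem.Str.len iw.2 > PySem.Str.len longest then iw.2 else longest
              else longest)
            longest)
        ""
      = (PySem.List.enumerate words 0).foldl
          (fun best iw =>
            if ((PySem.List.enumerate words 0).any
                  fun jw => iw.1 != jw.1 && is_semordnilap iw.2 jw.2) ∧
                PySem.Str.len iw.2 > PySem.Str.len best then iw.2 else best)
          "" := by
    apply PySem.List.foldl_congr_mem
    intro acc iw _
    exact innerA_eq iw.1 iw.2 (PySem.List.enumerate words 0) acc
  have h2 :
      (PySem.List.enumerate words 0).foldl
        (fun best iw =>
          if ((PySem.List.enumerate words 0).any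
                fun jw => iw.1 != jw.1 && is_semordnilap iw.2 jw.2) ∧
              PySem.Str.len iw.2 > PySem.Str.len best then iw.2 else best)
        ""
      = (PySem.List.enumerate words 0).foldl
          (fun best iw =>
            if PySem.Str.len iw.2 > PySem.Str.len best ∧
                ((words.count (pvRev iw.2) : Int) ≥ if pvRev iw.2 == iw.2 then 2 else 1)
              then iw.2 else best)
          "" := by
    apply PySem.List.foldl_congr_mem
    intro acc iw hiw
    exact if_congr (by rw [key_cond' words iw hiw]; exact and_comm) rfl rfl
  have h3 :
      (PySem.List.enumerate words 0).foldl
        (fun best iw =>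
          if PySem.Str.len iw.2 > PySem.Str.len best ∧
              ((words.count (pvRev iw.2) : Int) ≥ if pvRev iw.2 == iw.2 then 2 else 1)
            then iw.2 else best)
        ""
      = words.foldl
          (fun best w =>
            if PySem.Str.len w > PySem.Str.len best ∧
                ((words.count (pvRev w) : Int) ≥ if pvRev w == w then 2 else 1)
              then w else best)
          "" :=
    foldl_enumerate_snd words
      (fun best w =>
        if PySem.Str.len w > PySem.Str.len best ∧
            ((words.count (pvRev w) : Int) ≥ if pvRev w == w then 2 else 1)
          then w else best) 0 ""
  exact h1.trans (h2.trans h3)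

theorem B_eq_canon (words : List String) :
    find_longest_semordnilap_alt words = pvCanon words := by
  simp only [find_longest_semordnilap_alt]
  rw [PySem.Dict.foldl_insert_getD_add_one_eq_counter]
  unfold pvCanon
  apply PySem.List.foldl_congr_mem
  intro acc w _
  simp only [PySem.Str.slice?_none_none_neg_one, PySem.Dict.getD_counter]
  by_cases hl : PySem.Str.len w > PySem.Str.len acc
  · rw [if_pos hl]
    unfold pvRev
    split_ifs <;> first | rfl | tauto
  · rw [if_neg hl, if_neg (fun h => hl h.1)]

-- ===== VERDICT (by name: the statement is the Claim_ definition above) =====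
set_option maxHeartbeats 1000000 in
theorem find_longest_semordnilap_spec : Claim_equal_find_longest_semordnilap := by
  intro words _
  show find_longest_semordnilap words = find_longest_semordnilap_alt words
  rw [A_eq_canon words, B_eq_canon words]
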